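-- pv_equiv track=rewrite | github.com/L0WK3Y-IAAN/L0WK3Ys-Offensive-Operations-Toolkit | Mobile-RE-Toolkit/scripts/Android/Frida Ex/frida_ex.py | resolve_selection
-- ===== SOURCE A (Python) =====
-- from typing import List, Tuple, Optional
--
-- def calculate_match_score(query: str, text: str) -> Tuple[int, int, int, str]:
--     """
--     Calculate match score for ranking completions.
--     Returns (priority, -match_position, length, text_lower) for sorting.
--     Lower values = better match.
--
--     Priority levels:
--     0 = Exact match (case-insensitive)
--     1 = Starts with query
--     2 = Contains query as substring
--     3 = Fuzzy match (chars in order)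
--     4 = No match
--     """
--     query_lower = query.lower()
--     text_lower = text.lower()
--
--     # Exact match
--     if query_lower == text_lower:
--         return (0, 0, len(text), text_lower)
--
--     # Starts with
--     if text_lower.startswith(query_lower):
--         return (1, 0, len(text), text_lower)
--
--     # Contains as substring
--     pos = text_lower.find(query_lower)
--     if pos != -1:
--         return (2, -pos, len(text), text_lower)
--
--     # Fuzzy match (characters in order)
--     idx = 0
--     first_match_pos = -1
--     for i, ch in enumerate(text_lower):
--         if idx < len(query_lower) and ch == query_lower[idx]:
--             if first_match_pos == -1:
--                 first_match_pos = i
--             idx += 1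
--
--     if idx == len(query_lower):  # All chars found
--         return (3, -first_match_pos, len(text), text_lower)
--
--     # No match
--     return (4, 0, len(text), text_lower)
--
-- def resolve_selection(user_input: str, items: List[str], names: Optional[List[str]] = None) -> Optional[int]:
--     """
--     Resolve user input to item index (0-based).
--     Prioritizes exact matches over fuzzy matches.
--     """
--     if names is None:
--         names = items
--
--     user_lower = user_input.lower().strip()
--
--     # Direct numeric selection
--     if user_input.strip().isdigit():
--         idx = int(user_input.strip()) - 1
--         if 0 <= idx < len(items):
--             return idx
--         return None
--
--     # First, try exact match (case-insensitive)
--     for i, name in enumerate(names):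
--         if name.lower() == user_lower:
--             return i
--
--     # Then try starts-with match - prefer longer/more specific matches
--     starts_with_matches = []
--     for i, name in enumerate(names):
--         if name.lower().startswith(user_lower):
--             starts_with_matches.append((len(name), i, name))
--
--     if starts_with_matches:
--         # Sort by length (longer = more specific), then by index (stable order)
--         starts_with_matches.sort(key=lambda x: (-x[0], x[1]))
--         return starts_with_matches[0][1]
--
--     # Find best match using same scoring logic
--     best_score = (4, 0, 0, '')
--     best_idx = None
--
--     for i, name in enumerate(names):
--         score = calculate_match_score(user_input, name)
--         if score < best_score:
--             best_score = score
--             best_idx = i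
--
--     # Only return if we found at least a fuzzy match
--     if best_score[0] < 4:
--         return best_idx
--
--     return None
-- ===== SOURCE B (Python) =====
-- def _is_subseq(q, t):
--     # chars of q appear in order within t (recursive jump-to-next-occurrence)
--     if not q:
--         return True
--     j = t.find(q[0])
--     return j >= 0 and _is_subseq(q[1:], t[j + 1:])
--
--
-- def _rank(query, text):
--     """Composite ranking key, lower = better; priority 4 means no match."""
--     q = query.lower()
--     t = text.lower()
--     if q == t:
--         return (0, 0, len(text), t)
--     if t.startswith(q):
--         return (1, 0, len(text), t)
--     pos = t.find(q)
--     if pos >= 0: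
--         return (2, -pos, len(text), t)
--     if _is_subseq(q, t):
--         return (3, -t.find(q[0]), len(text), t)
--     return (4, 0, len(text), t)
--
--
-- def resolve_selection(user_input, items, names=None):
--     if names is None:
--         names = items
--     stripped = user_input.strip()
--     if stripped.isdigit():
--         idx = int(stripped) - 1
--         return idx if 0 <= idx < len(items) else None
--     user_lower = user_input.lower().strip()
--
--     # single pass: track the three kinds of candidates at once
--     exact = None            # first case-insensitive exact match
--     prefix = None           # (length, index) of the longest earliest starts-with match
--     fuzzy = None            # (rank, index) of the best-scoring earliest fuzzy candidate
--     for i, name in enumerate(names):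
--         low = name.lower()
--         if exact is None and low == user_lower:
--             exact = i
--         if low.startswith(user_lower) and (prefix is None or len(name) > prefix[0]):
--             prefix = (len(name), i)
--         r = _rank(user_input, name)
--         if r[0] < 4 and (fuzzy is None or r < fuzzy[0]):
--             fuzzy = (r, i)
--
--     if exact is not None:
--         return exact
--     if prefix is not None:
--         return prefix[1]
--     if fuzzy is not None:
--         return fuzzy[1]
--     return None
-- ===== Notes on version B (the rewrite author's own statement) =====
-- stated objective: alternative
-- what changed: B replaces A's three sequential scans over the names (exact-match loop, starts-with collection + sort, best-score loop) by a single pass that tracks the first exact match, the longest-earliest starts-with match and the best-scoring fuzzy candidate simultaneously, and its scorer tests the subsequence by recursive jump-to-first-occurrence (str.find) instead of A's counter loop.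
import Mathlib
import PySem

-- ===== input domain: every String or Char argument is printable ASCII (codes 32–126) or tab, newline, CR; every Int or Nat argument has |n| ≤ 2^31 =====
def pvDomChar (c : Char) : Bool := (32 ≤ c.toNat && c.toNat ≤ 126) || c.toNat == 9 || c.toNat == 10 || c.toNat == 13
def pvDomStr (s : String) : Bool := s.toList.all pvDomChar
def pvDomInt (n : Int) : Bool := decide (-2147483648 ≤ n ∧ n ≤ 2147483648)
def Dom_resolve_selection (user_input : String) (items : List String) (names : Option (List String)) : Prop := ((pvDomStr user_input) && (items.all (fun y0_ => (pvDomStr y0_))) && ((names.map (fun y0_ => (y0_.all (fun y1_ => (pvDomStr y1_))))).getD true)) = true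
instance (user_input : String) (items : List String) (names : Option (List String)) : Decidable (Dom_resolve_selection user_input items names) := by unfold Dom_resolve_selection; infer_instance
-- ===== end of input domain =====

-- B replaces A's three sequential scans (exact / starts-with + sort / best-score loop) by ONE pass
-- that tracks the three kinds of candidates simultaneously, and tests the fuzzy subsequence by
-- recursive jump-to-next-occurrence instead of A's counter loop; objective: alternative.

-- Python's `<` on 4-tuples (int, int, int, str): lexicographic (shared language primitive)
def pyLt4 (a b : Int × Int × Int × List Char) : Bool :=
  decide (a.1 < b.1) ||
    (a.1 == b.1 && (decide (a.2.1 < b.2.1) ||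
      (a.2.1 == b.2.1 && (decide (a.2.2.1 < b.2.2.1) ||
        (a.2.2.1 == b.2.2.1 && decide (a.2.2.2 < b.2.2.2))))))

-- ===== PORT A =====
-- A's fuzzy-matching loop over enumerate(text_lower), state (idx, first_match_pos)
def fuzzyLoop (ql tl : List Char) (s : Int) (st0 : Nat × Int) : Nat × Int :=
  (PySem.List.enumerate tl s).foldl
    (fun (st : Nat × Int) p =>
      if decide (st.1 < ql.length) && (ql[st.1]? == some p.2) then
        (st.1 + 1, if st.2 == -1 then p.1 else st.2)
      else st) st0

def calculate_match_score (query text : String) : Int × Int × Int × List Char :=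
  let ql := PySem.Chars.lower query.toList
  let tl := PySem.Chars.lower text.toList
  if ql == tl then (0, 0, (text.toList.length : Int), tl)
  else if PySem.Chars.startswith tl ql then (1, 0, (text.toList.length : Int), tl)
  else
    let pos := PySem.Chars.find tl ql
    if pos ≠ -1 then (2, -pos, (text.toList.length : Int), tl)
    else
      let st := fuzzyLoop ql tl 0 (0, -1)
      if st.1 == ql.length then (3, -st.2, (text.toList.length : Int), tl)
      else (4, 0, (text.toList.length : Int), tl)

def resolve_selection (user_input : String) (items : List String) (names : Option (List String)) : Option Int :=
  if PySem.Chars.strIsdigit (PySem.Chars.strip user_input.toList) then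
    match PySem.Int.ofChars? (PySem.Chars.strip user_input.toList) with
    | some n =>
      if 0 ≤ n - 1 ∧ n - 1 < (items.length : Int) then some (n - 1) else none
    | none => none   -- unreachable: int(s) succeeds when s.isdigit() on the ASCII domain
  else
    -- first loop: exact match, early return
    match (PySem.List.enumerate (names.getD items) 0).find?
        (fun p => PySem.Chars.lower p.2.toList == PySem.Chars.strip (PySem.Chars.lower user_input.toList)) with
    | some p => some p.1
    | none =>
      -- second loop: collect the starts-with matches (len(name), i, name)
      let swm := (PySem.List.enumerate (names.getD items) 0).foldl
        (fun acc p =>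
          if PySem.Chars.startswith (PySem.Chars.lower p.2.toList)
              (PySem.Chars.strip (PySem.Chars.lower user_input.toList)) then
            acc ++ [((p.2.toList.length : Int), p.1, p.2)]
          else acc) []
      if swm.isEmpty then
        -- third loop: best match by score, state (best_score, best_idx)
        let st := (PySem.List.enumerate (names.getD items) 0).foldl
          (fun (st : (Int × Int × Int × List Char) × Option Int) p =>
            if pyLt4 (calculate_match_score user_input p.2) st.1 then
              (calculate_match_score user_input p.2, some p.1)
            else st)
          (((4 : Int), (0 : Int), (0 : Int), ([] : List Char)), (none : Option Int))
        if st.1.1 < 4 then st.2 else none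
      else
        match PySem.List.sorted2 swm (fun x => -x.1) (fun x => x.2.1) with
        | m :: _ => some m.2.1
        | [] => none   -- unreachable: sorting a non-empty list

-- ===== PORT B =====
-- chars of q appear in order within t (recursive jump-to-next-occurrence)
def isSubseqB : List Char → List Char → Bool
  | [], _ => true
  | c :: qs, t =>
    let j := PySem.Chars.find t [c]
    decide (0 ≤ j) && isSubseqB qs (PySem.Chars.slice t (some (j + 1)) none)

def rankB (query text : String) : Int × Int × Int × List Char :=
  let q := PySem.Chars.lower query.toList
  let t := PySem.Chars.lower text.toList
  if q == t then (0, 0, (text.toList.length : Int), t)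
  else if PySem.Chars.startswith t q then (1, 0, (text.toList.length : Int), t)
  else
    let pos := PySem.Chars.find t q
    if 0 ≤ pos then (2, -pos, (text.toList.length : Int), t)
    else if isSubseqB q t then
      (3, -(PySem.Chars.find t (q.take 1)), (text.toList.length : Int), t)
    else (4, 0, (text.toList.length : Int), t)

-- the three tracker updates of B's single pass
def exStep (ul : List Char) (e : Option Int) (p : Int × String) : Option Int :=
  if e.isNone && (PySem.Chars.lower p.2.toList == ul) then some p.1 else e

def prStep (ul : List Char) (pr : Option (Int × Int)) (p : Int × String) : Option (Int × Int) :=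
  if PySem.Chars.startswith (PySem.Chars.lower p.2.toList) ul &&
       (pr.elim true (fun q => decide ((p.2.toList.length : Int) > q.1))) then
    some ((p.2.toList.length : Int), p.1)
  else pr

def fzStep (ui : String) (fz : Option ((Int × Int × Int × List Char) × Int)) (p : Int × String) :
    Option ((Int × Int × Int × List Char) × Int) :=
  if decide ((rankB ui p.2).1 < 4) && (fz.elim true (fun q => pyLt4 (rankB ui p.2) q.1)) then
    some (rankB ui p.2, p.1)
  else fz

def resolve_selection_alt (user_input : String) (items : List String) (names : Option (List String)) : Option Int :=
  if PySem.Chars.strIsdigit (PySem.Chars.strip user_input.toList) then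
    match PySem.Int.ofChars? (PySem.Chars.strip user_input.toList) with
    | some n =>
      if 0 ≤ n - 1 ∧ n - 1 < (items.length : Int) then some (n - 1) else none
    | none => none   -- unreachable as in A
  else
    -- single pass: (exact, prefix, fuzzy) trackers
    let st := (PySem.List.enumerate (names.getD items) 0).foldl
      (fun (st : Option Int × Option (Int × Int) × Option ((Int × Int × Int × List Char) × Int)) p =>
        (exStep (PySem.Chars.strip (PySem.Chars.lower user_input.toList)) st.1 p,
         prStep (PySem.Chars.strip (PySem.Chars.lower user_input.toList)) st.2.1 p,
         fzStep user_input st.2.2 p))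
      (none, none, none)
    match st.1 with
    | some e => some e
    | none =>
      match st.2.1 with
      | some pr => some pr.2
      | none =>
        match st.2.2 with
        | some fz => some fz.2
        | none => none

-- ===== PRECONDITION & SPEC =====
def Spec_resolve_selection (user_input : String) (items : List String) (names : Option (List String)) (out : Option Int) : Prop := out = resolve_selection_alt user_input items names
instance (user_input : String) (items : List String) (names : Option (List String)) (out : Option Int) : Decidable (Spec_resolve_selection user_input items names out) := by unfold Spec_resolve_selection; infer_instance

-- ===== CLAIM (what is proved, stated in full; the proofs are below) =====
def Claim_equal_resolve_selection : Prop := ∀ (user_input : String) (items : List String) (names : Option (List String)), Dom_resolve_selection user_input items names → Spec_resolve_selection user_input items names (resolve_selection user_input items names)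

-- ===== LEMMAS AND PROOFS =====

-- position of the first occurrence of a char, structurally
def firstPos (c : Char) : List Char → Int
  | [] => -1
  | d :: t => if d = c then 0 else (if firstPos c t = -1 then -1 else firstPos c t + 1)

theorem firstPos_cases (c : Char) : ∀ t : List Char, firstPos c t = -1 ∨ 0 ≤ firstPos c t := by
  intro t
  induction t with
  | nil => left; rfl
  | cons d t ih =>
    by_cases hd : d = c
    · right; simp [firstPos, hd]
    · rcases ih with h | h <;> simp only [firstPos, if_neg hd]
      · left; simp [h]
      · rw [if_neg (by omega)]; right; omega

theorem firstPos_neg_iff (c : Char) : ∀ t : List Char, firstPos c t = -1 ↔ c ∉ t := by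
  intro t
  induction t with
  | nil => simp [firstPos]
  | cons d t ih =>
    by_cases hd : d = c
    · simp [firstPos, hd]
    · simp only [firstPos, if_neg hd, List.mem_cons]
      rcases firstPos_cases c t with h | h
      · simp [h, ih.mp h, Ne.symm hd]
      · rw [if_neg (by omega)]
        have hmem : c ∈ t := by
          by_contra hc
          rw [← ih] at hc; omega
        constructor
        · intro h2; omega
        · intro h2; exact absurd (Or.inr hmem) h2

theorem firstPos_spec (c : Char) : ∀ t : List Char, firstPos c t ≠ -1 →
    0 ≤ firstPos c t ∧ t[(firstPos c t).toNat]? = some c ∧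
      ∀ i < (firstPos c t).toNat, t[i]? ≠ some c := by
  intro t
  induction t with
  | nil => intro h; exact absurd rfl h
  | cons d t ih =>
    intro h
    by_cases hd : d = c
    · refine ⟨by simp [firstPos, hd], by simp [firstPos, hd], ?_⟩
      intro i hi
      simp [firstPos, hd] at hi
    · simp only [firstPos, if_neg hd] at h ⊢
      have hne : firstPos c t ≠ -1 := by
        intro h0; rw [if_pos h0] at h; exact h rfl
      rw [if_neg hne] at h ⊢
      obtain ⟨h0, hget, hmin⟩ := ih hne
      have htn : (firstPos c t + 1).toNat = (firstPos c t).toNat + 1 := by omega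
      refine ⟨by omega, ?_, ?_⟩
      · rw [htn]; simpa using hget
      · intro i hi
        rw [htn] at hi
        match i with
        | 0 => simpa using fun h => hd h
        | Nat.succ j =>
          simp only [List.getElem?_cons_succ]
          exact hmin j (by omega)

theorem firstPos_ne_neg_one (c : Char) (t : List Char) (hm : c ∈ t) : firstPos c t ≠ -1 := by
  intro h0
  exact (firstPos_neg_iff c t).mp h0 hm

-- a singleton is a prefix of l iff l starts with that char
theorem singleton_prefix_iff (c : Char) (l : List Char) : [c] <+: l ↔ l.head? = some c := by
  constructor
  · rintro ⟨s, rfl⟩; rfl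
  · intro h
    match l, h with
    | d :: l', h =>
      have hdc : d = c := by simpa using h
      exact ⟨l', by rw [hdc]; rfl⟩

theorem singleton_prefix_drop_iff (c : Char) (t : List Char) (j : ℕ) :
    [c] <+: t.drop j ↔ t[j]? = some c := by
  rw [singleton_prefix_iff, List.head?_drop]

theorem find_singleton (c : Char) (t : List Char) : PySem.Chars.find t [c] = firstPos c t := by
  by_cases hm : c ∈ t
  · have hne := firstPos_ne_neg_one c t hm
    obtain ⟨h0, hget, hmin⟩ := firstPos_spec c t hne
    have hfind : PySem.Chars.find t [c] ≠ -1 := by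
      intro h0'
      rw [PySem.Chars.find_eq_neg_one_iff] at h0'
      exact h0' ((List.singleton_infix_iff c t).mpr hm)
    have hge : 0 ≤ PySem.Chars.find t [c] := by
      have := PySem.Chars.neg_one_le_find t [c]; omega
    obtain ⟨hpre, hfmin⟩ := PySem.Chars.find_spec hge
    rw [singleton_prefix_drop_iff] at hpre
    have h1 : ¬ (PySem.Chars.find t [c]).toNat < (firstPos c t).toNat :=
      fun hlt => hmin _ hlt hpre
    have h2 : ¬ (firstPos c t).toNat < (PySem.Chars.find t [c]).toNat :=
      fun hlt => hfmin _ hlt ((singleton_prefix_drop_iff c t _).mpr hget)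
    omega
  · rw [(firstPos_neg_iff c t).mpr hm, PySem.Chars.find_eq_neg_one_iff]
    intro hinf
    exact hm ((List.singleton_infix_iff c t).mp hinf)

theorem take_not_mem (c : Char) (t : List Char) (b : ℕ)
    (hmin : ∀ i < b, t[i]? ≠ some c) : c ∉ t.take b := by
  intro hmem
  obtain ⟨i, hi, hget⟩ := List.getElem_of_mem hmem
  have hi' := hi
  rw [List.length_take] at hi'
  apply hmin i (by omega)
  rw [List.getElem?_eq_getElem (by omega)]
  rw [List.getElem_take] at hget
  simp [hget]

theorem first_occ_cons_sublist (c : Char) (qs : List Char) :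
    ∀ (pre suf : List Char), c ∉ pre → ((c :: qs).Sublist (pre ++ c :: suf) ↔ qs.Sublist suf) := by
  intro pre
  induction pre with
  | nil =>
    intro suf _
    simpa using List.cons_sublist_cons
  | cons d pre ih =>
    intro suf hc
    have hcd : c ≠ d := fun h => hc (h ▸ List.mem_cons_self)
    have hcp : c ∉ pre := fun h => hc (List.mem_cons_of_mem d h)
    constructor
    · intro h
      cases h with
      | cons _ h' => exact (ih suf hcp).mp h'
      | cons₂ _ h' => exact absurd rfl hcd
    · intro h
      exact List.Sublist.cons d ((ih suf hcp).mpr h)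

theorem isSubseqB_iff (q : List Char) : ∀ t : List Char, (isSubseqB q t = true ↔ q.Sublist t) := by
  induction q with
  | nil => intro t; simp [isSubseqB]
  | cons c qs ih =>
    intro t
    rw [isSubseqB]
    simp only [PySem.Chars.slice_eq_listSlice, find_singleton]
    by_cases hm : c ∈ t
    · have hne := firstPos_ne_neg_one c t hm
      obtain ⟨h0, hget, hmin⟩ := firstPos_spec c t hne
      have hblt : (firstPos c t).toNat < t.length := by
        by_contra hbl
        rw [List.getElem?_eq_none (by omega)] at hget
        simp at hget
      have hslice : PySem.List.slice t (some (firstPos c t + 1)) none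
          = t.drop ((firstPos c t).toNat + 1) := by
        rw [PySem.List.slice_from t (show (0:Int) ≤ firstPos c t + 1 by omega)]
        congr 1; omega
      have hdecomp : t = t.take (firstPos c t).toNat ++ c :: t.drop ((firstPos c t).toNat + 1) := by
        conv_lhs => rw [← List.take_append_drop (firstPos c t).toNat t]
        congr 1
        rw [List.drop_eq_getElem_cons hblt]
        congr 1
        rw [List.getElem?_eq_getElem hblt] at hget
        exact Option.some.inj hget
      rw [hslice, decide_eq_true (by omega : (0:Int) ≤ firstPos c t)]
      simp only [Bool.true_and]
      rw [ih (t.drop ((firstPos c t).toNat + 1))]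
      conv_rhs => rw [hdecomp]
      exact (first_occ_cons_sublist c qs _ _ (take_not_mem c t _ hmin)).symm
    · rw [(firstPos_neg_iff c t).mpr hm]
      simp only [show ¬ ((0:Int) ≤ -1) by omega, decide_false, Bool.false_and]
      constructor
      · intro h; simp at h
      · intro h; exact absurd (h.subset List.mem_cons_self) hm

theorem fuzzyLoop_nil (ql : List Char) (s : Int) (st0 : Nat × Int) :
    fuzzyLoop ql [] s st0 = st0 := rfl

theorem fuzzyLoop_cons (ql : List Char) (d : Char) (tl : List Char) (s : Int) (st0 : Nat × Int) :
    fuzzyLoop ql (d :: tl) s st0 =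
      fuzzyLoop ql tl (s + 1)
        (if decide (st0.1 < ql.length) && (ql[st0.1]? == some d) then
          (st0.1 + 1, if st0.2 == -1 then s else st0.2)
        else st0) := by
  rw [fuzzyLoop, PySem.List.enumerate_cons]
  rfl

theorem cons_sublist_cons_of_ne {x y : Char} {l t : List Char} (h : x ≠ y) :
    (x :: l).Sublist (y :: t) ↔ (x :: l).Sublist t := by
  constructor
  · intro hs
    cases hs with
    | cons _ h' => exact h'
    | cons₂ _ h' => exact absurd rfl h
  · intro hs
    exact hs.cons y

theorem fuzzyLoop_idx (ql : List Char) : ∀ (tl : List Char) (s : Int) (idx : Nat) (fmp : Int),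
    idx ≤ ql.length →
    ((fuzzyLoop ql tl s (idx, fmp)).1 = ql.length ↔ (ql.drop idx).Sublist tl) := by
  intro tl
  induction tl with
  | nil =>
    intro s idx fmp hle
    rw [fuzzyLoop_nil]
    simp only [List.sublist_nil, List.drop_eq_nil_iff]
    constructor <;> (intro h; omega)
  | cons d tl ih =>
    intro s idx fmp hle
    rw [fuzzyLoop_cons]
    by_cases hg : idx < ql.length ∧ ql[idx]? = some d
    · obtain ⟨hlt, hq⟩ := hg
      have hq' : ql[idx] = d := by
        rw [List.getElem?_eq_getElem hlt] at hq
        exact Option.some.inj hq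
      rw [if_pos (by rw [hq]; simp [hlt])]
      have hdq : ql.drop idx = d :: ql.drop (idx + 1) := by
        rw [List.drop_eq_getElem_cons hlt, hq']
      rw [ih (s+1) (idx+1) _ (by omega), hdq, List.cons_sublist_cons]
    · rw [if_neg (by
        intro hc
        simp only [Bool.and_eq_true, decide_eq_true_eq, beq_iff_eq] at hc
        exact hg hc)]
      rw [ih (s+1) idx fmp hle]
      by_cases hidx : idx < ql.length
      · have hnd : ql[idx] ≠ d := fun he => hg ⟨hidx, by rw [List.getElem?_eq_getElem hidx, he]⟩
        rw [List.drop_eq_getElem_cons hidx]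
        exact (cons_sublist_cons_of_ne hnd).symm
      · have hidx' : idx = ql.length := by omega
        subst hidx'
        simp

theorem fuzzyLoop_fmp_stay (ql : List Char) : ∀ (tl : List Char) (s : Int) (idx : Nat) (fmp : Int),
    fmp ≠ -1 → (fuzzyLoop ql tl s (idx, fmp)).2 = fmp := by
  intro tl
  induction tl with
  | nil => intro s idx fmp _; rfl
  | cons d tl ih =>
    intro s idx fmp hfmp
    rw [fuzzyLoop_cons]
    by_cases hg : (decide (idx < ql.length) && (ql[idx]? == some d)) = true
    · rw [if_pos hg]
      simp only [show (fmp == -1) = false by simpa using hfmp]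
      exact ih (s+1) (idx+1) fmp hfmp
    · rw [if_neg hg]
      exact ih (s+1) idx fmp hfmp

theorem fuzzyLoop_fmp (ql : List Char) (c : Char) (hc : ql[0]? = some c) :
    ∀ (tl : List Char) (s : Int), 0 ≤ s →
    (fuzzyLoop ql tl s (0, -1)).2 = (if firstPos c tl = -1 then -1 else s + firstPos c tl) := by
  have hlen : 0 < ql.length := by
    by_contra h
    rw [List.getElem?_eq_none (by omega)] at hc
    simp at hc
  intro tl
  induction tl with
  | nil => intro s _; rfl
  | cons d tl ih =>
    intro s hs
    rw [fuzzyLoop_cons]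
    by_cases hd : d = c
    · rw [if_pos (by rw [hc, hd]; simp [hlen])]
      simp only [show ((-1 : Int) == -1) = true from rfl, if_true]
      rw [fuzzyLoop_fmp_stay ql tl (s+1) 1 s (by omega)]
      simp [firstPos, hd]
    · rw [if_neg (by
        simp only [Bool.and_eq_true, decide_eq_true_eq, beq_iff_eq, hc]
        rintro ⟨-, h⟩
        exact hd (Option.some.inj h).symm)]
      rw [ih (s+1) (by omega)]
      simp only [firstPos, if_neg hd]
      rcases firstPos_cases c tl with h | h
      · simp [h]
      · rw [if_neg (by omega), if_neg (by omega), if_neg (by omega)]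
        omega

theorem scoreEq (q t : String) : calculate_match_score q t = rankB q t := by
  unfold calculate_match_score rankB
  simp only []
  by_cases h1 : (PySem.Chars.lower q.toList == PySem.Chars.lower t.toList) = true
  · rw [if_pos h1, if_pos h1]
  · rw [if_neg h1, if_neg h1]
    by_cases h2 : PySem.Chars.startswith (PySem.Chars.lower t.toList) (PySem.Chars.lower q.toList) = true
    · rw [if_pos h2, if_pos h2]
    · rw [if_neg h2, if_neg h2]
      have hfge := PySem.Chars.neg_one_le_find (PySem.Chars.lower t.toList) (PySem.Chars.lower q.toList)
      by_cases h3 : (0 : Int) ≤ PySem.Chars.find (PySem.Chars.lower t.toList) (PySem.Chars.lower q.toList)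
      · rw [if_pos (by omega : PySem.Chars.find (PySem.Chars.lower t.toList) (PySem.Chars.lower q.toList) ≠ -1), if_pos h3]
      · rw [if_neg (by omega : ¬ PySem.Chars.find (PySem.Chars.lower t.toList) (PySem.Chars.lower q.toList) ≠ -1), if_neg h3]
        -- fuzzy region; the query is non-empty since startswith failed
        have hql : PySem.Chars.lower q.toList ≠ [] := by
          intro hnil
          rw [PySem.Chars.startswith_iff] at h2
          exact h2 (hnil ▸ List.nil_prefix)
        obtain ⟨c, qs, hcq⟩ := List.exists_cons_of_ne_nil hql
        have hc0 : (PySem.Chars.lower q.toList)[0]? = some c := by rw [hcq]; rfl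
        have hiff : ((fuzzyLoop (PySem.Chars.lower q.toList) (PySem.Chars.lower t.toList) 0 (0, -1)).1
              = (PySem.Chars.lower q.toList).length)
            ↔ isSubseqB (PySem.Chars.lower q.toList) (PySem.Chars.lower t.toList) = true := by
          rw [fuzzyLoop_idx (PySem.Chars.lower q.toList) (PySem.Chars.lower t.toList) 0 0 (-1) (Nat.zero_le _),
            List.drop_zero, isSubseqB_iff]
        by_cases hsub : isSubseqB (PySem.Chars.lower q.toList) (PySem.Chars.lower t.toList) = true
        · rw [if_pos (by simpa using hiff.mpr hsub), if_pos hsub]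
          have hcm : c ∈ PySem.Chars.lower t.toList := by
            have hsubl := (isSubseqB_iff _ _).mp hsub
            rw [hcq] at hsubl
            exact hsubl.subset List.mem_cons_self
          have hfp := firstPos_ne_neg_one c _ hcm
          have h2v := fuzzyLoop_fmp (PySem.Chars.lower q.toList) c hc0 (PySem.Chars.lower t.toList) 0 le_rfl
          rw [if_neg hfp] at h2v
          have htake : (PySem.Chars.lower q.toList).take 1 = [c] := by rw [hcq]; rfl
          rw [htake, find_singleton, h2v]
          norm_num
        · rw [if_neg (by simpa using fun h => hsub (hiff.mp h)), if_neg hsub]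

theorem foldl_first {α : Type} (p : α → Bool) (f : α → Int) :
    ∀ (l : List α) (acc : Option Int),
      l.foldl (fun e x => if e.isNone && p x then some (f x) else e) acc
        = acc.elim ((l.find? p).map f) some := by
  intro l
  induction l with
  | nil => intro acc; cases acc <;> rfl
  | cons x l ih =>
    intro acc
    cases acc with
    | some v =>
      simp only [List.foldl_cons, Option.isNone_some, Bool.false_and, if_neg Bool.false_ne_true]
      rw [ih (some v)]
      rfl
    | none =>
      simp only [List.foldl_cons, Option.isNone_none, Bool.true_and]
      by_cases hp : p x = true
      · rw [if_pos hp, ih (some (f x)), List.find?_cons_of_pos hp]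
        rfl
      · rw [if_neg hp, ih none, List.find?_cons_of_neg (by simpa using hp)]

theorem exact_tracker (ul : List Char) (E : List (Int × String)) :
    E.foldl (exStep ul) none
      = (E.find? (fun p => PySem.Chars.lower p.2.toList == ul)).map (fun p => p.1) := by
  exact foldl_first (fun p : Int × String => PySem.Chars.lower p.2.toList == ul) (fun p => p.1) E none

theorem pr_tracker (ul : List Char) (E : List (Int × String)) :
    E.foldl (prStep ul) none
      = (E.filter (fun p => PySem.Chars.startswith (PySem.Chars.lower p.2.toList) ul)).foldl
          (fun pr p =>
            if pr.elim true (fun q => decide ((p.2.toList.length : Int) > q.1)) then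
              some ((p.2.toList.length : Int), p.1)
            else pr) none := by
  rw [List.foldl_filter]
  congr 1
  funext pr p
  by_cases hsw : PySem.Chars.startswith (PySem.Chars.lower p.2.toList) ul = true
  · simp [prStep, hsw]
  · simp [prStep, Bool.eq_false_iff.mpr hsw]

theorem insertBy_cons (before : (Int × Int × String) → (Int × Int × String) → Bool)
    (x h : Int × Int × String) (t : List (Int × Int × String)) :
    PySem.List.insertBy before x (h :: t)
      = if before x h then x :: h :: t else h :: PySem.List.insertBy before x t := rfl

theorem head_foldl_insertBy (before : (Int × Int × String) → (Int × Int × String) → Bool) :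
    ∀ (xs : List (Int × Int × String)) (h : Int × Int × String) (t : List (Int × Int × String)), ∃ t',
      xs.foldl (fun acc x => PySem.List.insertBy before x acc) (h :: t)
        = (xs.foldl (fun m x => if before x m then x else m) h) :: t' := by
  intro xs
  induction xs with
  | nil => intro h t; exact ⟨t, rfl⟩
  | cons x xs ih =>
    intro h t
    simp only [List.foldl_cons, insertBy_cons]
    by_cases hb : before x h = true
    · rw [if_pos hb, if_pos hb]
      exact ih x (h :: t)
    · rw [if_neg hb, if_neg hb]
      exact ih h (PySem.List.insertBy before x t)

theorem trk (rest : List (Int × String)) : ∀ (cl ci : Int) (nm : String),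
    (∀ x ∈ rest, ci < x.1) → rest.Pairwise (fun a b => a.1 < b.1) →
    rest.foldl (fun pr p =>
        if pr.elim true (fun q => decide ((p.2.toList.length : Int) > q.1)) then
          some ((p.2.toList.length : Int), p.1)
        else pr) (some (cl, ci))
      = some ((rest.foldl (fun m x =>
            if (decide (-((x.2.toList.length : Int)) < -m.1) ||
                (!decide (-m.1 < -((x.2.toList.length : Int))) && decide (x.1 < m.2.1))) then
              ((x.2.toList.length : Int), x.1, x.2)
            else m) (cl, ci, nm)).1,
          (rest.foldl (fun m x =>
            if (decide (-((x.2.toList.length : Int)) < -m.1) ||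
                (!decide (-m.1 < -((x.2.toList.length : Int))) && decide (x.1 < m.2.1))) then
              ((x.2.toList.length : Int), x.1, x.2)
            else m) (cl, ci, nm)).2.1) := by
  induction rest with
  | nil => intro cl ci nm _ _; rfl
  | cons x rest ih =>
    intro cl ci nm h hp
    have hx : ci < x.1 := h x List.mem_cons_self
    have hrest : ∀ y ∈ rest, x.1 < y.1 := fun y hy => (List.pairwise_cons.mp hp).1 y hy
    have hp' := (List.pairwise_cons.mp hp).2
    simp only [List.foldl_cons, Option.elim_some]
    have hA : (decide (-((x.2.toList.length : Int)) < -cl) ||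
        (!decide (-cl < -((x.2.toList.length : Int))) && decide (x.1 < ci)))
        = decide (cl < (x.2.toList.length : Int)) := by
      by_cases hb : cl < (x.2.toList.length : Int)
      · rw [decide_eq_true hb,
          decide_eq_true (by omega : -((x.2.toList.length : Int)) < -cl), Bool.true_or]
      · rw [decide_eq_false hb,
          decide_eq_false (by omega : ¬ -((x.2.toList.length : Int)) < -cl),
          decide_eq_false (by omega : ¬ x.1 < ci), Bool.and_false, Bool.or_false]
    rw [hA]
    by_cases hb : cl < (x.2.toList.length : Int)
    · rw [if_pos (by simpa using hb), if_pos (by simpa using hb)]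
      exact ih _ _ _ hrest hp'
    · rw [if_neg (by simpa using hb), if_neg (by simpa using hb)]
      exact ih _ _ _ (fun y hy => h y (List.mem_cons_of_mem x hy)) hp'

theorem score_shape4 (q t : String) :
    (calculate_match_score q t).1 = 4 →
    (calculate_match_score q t).2.1 = 0 ∧ 0 ≤ (calculate_match_score q t).2.2.1 := by
  unfold calculate_match_score
  simp only []
  split_ifs <;> intro h <;> simp_all

def RelSc (bs : Int × Int × Int × List Char) (bi : Option Int)
    (fz : Option ((Int × Int × Int × List Char) × Int)) : Prop :=
  (bs = ((4 : Int), (0 : Int), (0 : Int), ([] : List Char)) ∧ bi = none ∧ fz = none) ∨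
  (bs.1 < 4 ∧ ∃ j, bi = some j ∧ fz = some (bs, j))

theorem pyLt4_init_iff (q t : String) :
    pyLt4 (calculate_match_score q t) ((4 : Int), (0 : Int), (0 : Int), ([] : List Char)) = true
      ↔ (calculate_match_score q t).1 < 4 := by
  unfold pyLt4
  simp only [Bool.or_eq_true, Bool.and_eq_true, decide_eq_true_eq, beq_iff_eq]
  constructor
  · rintro (h | ⟨h4, h | ⟨hz, h | ⟨hz2, hlex⟩⟩⟩)
    · exact h
    · obtain ⟨hsh, -⟩ := score_shape4 q t h4; omega
    · obtain ⟨-, hsh⟩ := score_shape4 q t h4; omega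
    · exact absurd hlex (List.not_lt_nil _)
  · intro h; exact Or.inl h

theorem pyLt4_le_first (a b : Int × Int × Int × List Char) (h : pyLt4 a b = true) : a.1 ≤ b.1 := by
  unfold pyLt4 at h
  simp only [Bool.or_eq_true, Bool.and_eq_true, decide_eq_true_eq, beq_iff_eq] at h
  rcases h with h | ⟨h, -⟩ <;> omega

theorem scoring_rel (ui : String) : ∀ (E : List (Int × String)) (bs : Int × Int × Int × List Char)
    (bi : Option Int) (fz : Option ((Int × Int × Int × List Char) × Int)), RelSc bs bi fz →
    RelSc (E.foldl (fun st p =>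
          if pyLt4 (calculate_match_score ui p.2) st.1 then
            (calculate_match_score ui p.2, some p.1) else st) (bs, bi)).1
      (E.foldl (fun st p =>
          if pyLt4 (calculate_match_score ui p.2) st.1 then
            (calculate_match_score ui p.2, some p.1) else st) (bs, bi)).2
      (E.foldl (fzStep ui) fz) := by
  intro E
  induction E with
  | nil => intro bs bi fz h; exact h
  | cons p E ih =>
    intro bs bi fz h
    simp only [List.foldl_cons]
    have hr : rankB ui p.2 = calculate_match_score ui p.2 := (scoreEq ui p.2).symm
    rcases h with ⟨hbs, hbi, hfz⟩ | ⟨hlt, j, hbi, hfz⟩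
    · subst hbs; subst hbi; subst hfz
      by_cases h4 : (calculate_match_score ui p.2).1 < 4
      · rw [if_pos ((pyLt4_init_iff ui p.2).mpr h4)]
        unfold fzStep
        rw [hr, if_pos (by simp [h4])]
        exact ih _ _ _ (Or.inr ⟨h4, p.1, rfl, rfl⟩)
      · rw [if_neg (fun hc => h4 ((pyLt4_init_iff ui p.2).mp hc))]
        unfold fzStep
        rw [hr, if_neg (by simp [h4])]
        exact ih _ _ _ (Or.inl ⟨rfl, rfl, rfl⟩)
    · subst hbi; subst hfz
      by_cases hpl : pyLt4 (calculate_match_score ui p.2) bs = true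
      · have h4 : (calculate_match_score ui p.2).1 < 4 :=
          lt_of_le_of_lt (pyLt4_le_first _ _ hpl) hlt
        rw [if_pos hpl]
        unfold fzStep
        rw [hr, if_pos (by simp [h4, hpl])]
        exact ih _ _ _ (Or.inr ⟨h4, p.1, rfl, rfl⟩)
      · rw [if_neg hpl]
        unfold fzStep
        rw [hr, if_neg (by
          simp only [Bool.and_eq_true, Option.elim_some]
          rintro ⟨-, hc⟩
          exact hpl hc)]
        exact ih _ _ _ (Or.inr ⟨hlt, j, rfl, rfl⟩)

theorem foldl_prod3 {α β1 β2 β3 : Type} (f1 : β1 → α → β1) (f2 : β2 → α → β2) (f3 : β3 → α → β3) :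
    ∀ (l : List α) (a : β1) (b : β2) (c : β3),
      l.foldl (fun st p => (f1 st.1 p, f2 st.2.1 p, f3 st.2.2 p)) (a, b, c)
        = (l.foldl f1 a, l.foldl f2 b, l.foldl f3 c) := by
  intro l
  induction l with
  | nil => intro a b c; rfl
  | cons x l ih => intro a b c; exact ih (f1 a x) (f2 b x) (f3 c x)

-- ===== VERDICT (by name: the statement is the Claim_ definition above) =====
theorem resolve_selection_spec : Claim_equal_resolve_selection := by
  intro ui items names _dom
  unfold Spec_resolve_selection resolve_selection resolve_selection_alt
  by_cases hdig : PySem.Chars.strIsdigit (PySem.Chars.strip ui.toList) = true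
  · rw [if_pos hdig, if_pos hdig]
  · rw [if_neg hdig, if_neg hdig]
    simp only [foldl_prod3 (exStep (PySem.Chars.strip (PySem.Chars.lower ui.toList)))
        (prStep (PySem.Chars.strip (PySem.Chars.lower ui.toList))) (fzStep ui),
      exact_tracker]
    cases hfind : (PySem.List.enumerate (names.getD items) 0).find?
        (fun p => PySem.Chars.lower p.2.toList == PySem.Chars.strip (PySem.Chars.lower ui.toList)) with
    | some p => simp [hfind]
    | none =>
      simp only [hfind, Option.map_none]
      rw [pr_tracker]
      rw [PySem.List.foldl_append_if
        (fun p : Int × String => PySem.Chars.startswith (PySem.Chars.lower p.2.toList)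
          (PySem.Chars.strip (PySem.Chars.lower ui.toList)))
        (fun p : Int × String => ((p.2.toList.length : Int), p.1, p.2))
        (PySem.List.enumerate (names.getD items) 0) []]
      simp only [List.nil_append]
      have hpwf : ((PySem.List.enumerate (names.getD items) 0).filter
          (fun p => PySem.Chars.startswith (PySem.Chars.lower p.2.toList)
            (PySem.Chars.strip (PySem.Chars.lower ui.toList)))).Pairwise
          (fun a b => a.1 < b.1) :=
        (PySem.List.pairwise_lt_enumerate _ _).filter _
      cases hfilt : (PySem.List.enumerate (names.getD items) 0).filter
          (fun p => PySem.Chars.startswith (PySem.Chars.lower p.2.toList)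
            (PySem.Chars.strip (PySem.Chars.lower ui.toList))) with
      | nil =>
        simp only [hfilt, List.map_nil, List.isEmpty_nil, if_pos, List.foldl_nil]
        have hrel := scoring_rel ui (PySem.List.enumerate (names.getD items) 0)
          ((4 : Int), (0 : Int), (0 : Int), ([] : List Char)) none none
          (Or.inl ⟨rfl, rfl, rfl⟩)
        rcases hrel with ⟨hbs, hbi, hfz⟩ | ⟨hlt, j, hbi, hfz⟩
        · rw [hfz, hbs, if_neg (by norm_num)]
        · rw [hfz, hbi, if_pos hlt]
      | cons e rest =>
        rw [hfilt] at hpwf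
        simp only [hfilt, List.map_cons, List.isEmpty_cons, if_neg Bool.false_ne_true]
        simp only [PySem.List.sorted2]
        simp only [List.foldl_cons]
        rw [if_neg Bool.false_ne_true]
        obtain ⟨t', ht'⟩ := head_foldl_insertBy
          (fun a b => decide (-a.1 < -b.1) || !decide (-b.1 < -a.1) && decide (a.2.1 < b.2.1))
          (List.map (fun p : Int × String => ((p.2.toList.length : Int), p.1, p.2)) rest)
          ((e.2.toList.length : Int), e.1, e.2) []
        rw [show PySem.List.insertBy
            (fun (a b : Int × Int × String) =>
              decide (-a.1 < -b.1) || !decide (-b.1 < -a.1) && decide (a.2.1 < b.2.1))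
            ((e.2.toList.length : Int), e.1, e.2) []
          = [((e.2.toList.length : Int), e.1, e.2)] from rfl]
        rw [ht', List.foldl_map]
        simp only [Option.elim_none, eq_self_iff_true, if_true]
        rw [trk rest (e.2.toList.length : Int) e.1 e.2
          (fun y hy => (List.pairwise_cons.mp hpwf).1 y hy) (List.pairwise_cons.mp hpwf).2]
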